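-- pv_equiv track=rewrite | github.com/haridandapani/ComputationalBiologyWeb | kmp.py | highlightHits
-- ===== SOURCE A (Python) =====
-- def highlightHits(search, hits):
--     highlighted = ""
--     for i in range(len(search)):
--         if i in hits:
--             highlighted +="<mark>"+search[i]+"</mark>"
--         else:
--             highlighted += search[i]
--     return highlighted
-- ===== SOURCE B (Python) =====
-- def highlightHits(search, hits):
--     n = len(search)
--     ps = sorted({p for p in hits if 0 <= p < n})
--     parts = []
--     prev = 0
--     for p in ps:
--         parts.append(search[prev:p])
--         parts.append("<mark>" + search[p] + "</mark>")
--         prev = p + 1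
--     parts.append(search[prev:])
--     return "".join(parts)
-- ===== Notes on version B (the rewrite author's own statement) =====
-- stated objective: faster
-- what changed: B sorts and dedups the in-range hit positions once and walks them with a prev cursor, copying untouched slices wholesale, instead of scanning every character and testing 'i in hits' with a linear membership scan per character.
import Mathlib
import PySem

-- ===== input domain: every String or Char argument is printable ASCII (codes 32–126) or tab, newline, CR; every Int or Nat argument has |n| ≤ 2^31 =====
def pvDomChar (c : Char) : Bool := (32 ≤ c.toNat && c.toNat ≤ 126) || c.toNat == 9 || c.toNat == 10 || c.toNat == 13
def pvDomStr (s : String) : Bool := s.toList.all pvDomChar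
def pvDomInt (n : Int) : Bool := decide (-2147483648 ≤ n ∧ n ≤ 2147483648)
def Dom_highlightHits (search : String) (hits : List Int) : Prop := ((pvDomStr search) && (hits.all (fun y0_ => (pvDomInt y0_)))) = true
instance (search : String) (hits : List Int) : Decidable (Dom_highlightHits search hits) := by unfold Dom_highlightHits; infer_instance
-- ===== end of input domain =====

-- B replaces A's scan of every character (with a linear 'i in hits' membership test each) by one
-- sorted/deduplicated pass over the in-range hit positions, copying the untouched slices wholesale (faster).

-- ===== PORT A =====
def highlightHits (search : String) (hits : List Int) : String :=
  String.ofList ((PySem.List.pyRange 0 (search.toList.length : Int) 1).foldl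
    (fun acc i =>
      if i ∈ hits then
        acc ++ ("<mark>".toList ++ [PySem.List.pyGetD search.toList i ' '] ++ "</mark>".toList)
      else
        acc ++ [PySem.List.pyGetD search.toList i ' ']) [])

-- ===== PORT B =====
-- the 'for p in ps' loop of Source B, with its running cursor prev; the parts are joined as they are produced
def pvWalk (cs : List Char) : List Int → Int → List Char
  | [], prev => PySem.List.slice cs (some prev) none
  | p :: rest, prev =>
      PySem.List.slice cs (some prev) (some p)
        ++ ("<mark>".toList ++ [PySem.List.pyGetD cs p ' '] ++ "</mark>".toList)
        ++ pvWalk cs rest (p + 1)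

def highlightHits_alt (search : String) (hits : List Int) : String :=
  String.ofList (pvWalk search.toList
    (PySem.List.sorted
      (PySem.Set.ofList (hits.filter (fun p => decide (0 ≤ p) && decide (p < (search.toList.length : Int)))))
      (fun x => x) false)
    0)

-- ===== PRECONDITION & SPEC =====
def Spec_highlightHits (search : String) (hits : List Int) (out : String) : Prop := out = highlightHits_alt search hits
instance (search : String) (hits : List Int) (out : String) : Decidable (Spec_highlightHits search hits out) := by unfold Spec_highlightHits; infer_instance

-- ===== CLAIM (what is proved, stated in full; the proofs are below) =====
def Claim_equal_highlightHits : Prop := ∀ (search : String) (hits : List Int), Dom_highlightHits search hits → Spec_highlightHits search hits (highlightHits search hits)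

-- ===== LEMMAS AND PROOFS =====

/-- contribution of index i when the list of highlighted positions is S -/
def pvPiece (cs : List Char) (S : List Int) (i : Int) : List Char :=
  if i ∈ S then "<mark>".toList ++ [PySem.List.pyGetD cs i ' '] ++ "</mark>".toList
  else [PySem.List.pyGetD cs i ' ']

lemma pv_flatMap_congr {α β : Type} (l : List α) (f g : α → List β)
    (h : ∀ x ∈ l, f x = g x) : l.flatMap f = l.flatMap g := by
  induction l with
  | nil => rfl
  | cons a t ih =>
      simp only [List.flatMap_cons]
      rw [h a (by simp), ih (fun x hx => h x (by simp [hx]))]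

lemma pv_map_pyGetD_subrange (cs : List Char) (a b : Int)
    (ha : 0 ≤ a) (hab : a ≤ b) (hb : b ≤ (cs.length : Int)) :
    (PySem.List.pyRange a b 1).map (fun i => PySem.List.pyGetD cs i ' ')
      = (cs.drop a.toNat).take (b.toNat - a.toNat) := by
  have hsplit := PySem.List.pyRange_one_append a b (cs.length : Int) hab hb
  have hda := PySem.List.map_pyGetD_pyRange' cs ' ' ha
  have hdb := PySem.List.map_pyGetD_pyRange' cs ' ' (le_trans ha hab)
  rw [hsplit, List.map_append, hdb] at hda
  have hlen : ((PySem.List.pyRange a b 1).map (fun i => PySem.List.pyGetD cs i ' ')).length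
      = b.toNat - a.toNat := by
    simp [PySem.List.length_pyRange_one]
    omega
  calc (PySem.List.pyRange a b 1).map (fun i => PySem.List.pyGetD cs i ' ')
      = (((PySem.List.pyRange a b 1).map (fun i => PySem.List.pyGetD cs i ' '))
          ++ cs.drop b.toNat).take (b.toNat - a.toNat) := by
        rw [List.take_append_of_le_length (by omega), List.take_of_length_le (by omega)]
    _ = (cs.drop a.toNat).take (b.toNat - a.toNat) := by rw [hda]

lemma pv_walk_eq (cs : List Char) (ps : List Int) (prev : Int)
    (hsort : ps.Pairwise (· < ·))
    (hlo : ∀ p ∈ ps, prev ≤ p) (hhi : ∀ p ∈ ps, p < (cs.length : Int))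
    (h0 : 0 ≤ prev) (hn : prev ≤ (cs.length : Int)) :
    pvWalk cs ps prev = (PySem.List.pyRange prev (cs.length : Int) 1).flatMap (pvPiece cs ps) := by
  induction ps generalizing prev with
  | nil =>
      have h1 : (PySem.List.pyRange prev (cs.length : Int) 1).flatMap (pvPiece cs ([] : List Int))
          = (PySem.List.pyRange prev (cs.length : Int) 1).map (fun i => PySem.List.pyGetD cs i ' ') := by
        rw [List.map_eq_flatMap]
        exact pv_flatMap_congr _ _ _ (by intro x _; simp [pvPiece])
      rw [pvWalk, h1, PySem.List.map_pyGetD_pyRange' cs ' ' h0, PySem.List.slice_from _ h0]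
  | cons p rest ih =>
      have hp : prev ≤ p := hlo p (by simp)
      have hpn : p < (cs.length : Int) := hhi p (by simp)
      have hrest_gt : ∀ q ∈ rest, p < q := by
        intro q hq; exact (List.pairwise_cons.mp hsort).1 q hq
      have hsplit : PySem.List.pyRange prev (cs.length : Int) 1
          = PySem.List.pyRange prev (p + 1) 1 ++ PySem.List.pyRange (p + 1) (cs.length : Int) 1 :=
        PySem.List.pyRange_one_append _ _ _ (by omega) (by omega)
      have hsplit2 : PySem.List.pyRange prev (p + 1) 1
          = PySem.List.pyRange prev p 1 ++ [p] := PySem.List.pyRange_one_succ_right hp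
      rw [pvWalk, hsplit, hsplit2, List.flatMap_append, List.flatMap_append]
      -- left part: indices strictly below p, none highlighted
      have hleft : (PySem.List.pyRange prev p 1).flatMap (pvPiece cs (p :: rest))
          = PySem.List.slice cs (some prev) (some p) := by
        have h2 : (PySem.List.pyRange prev p 1).flatMap (pvPiece cs (p :: rest))
            = (PySem.List.pyRange prev p 1).map (fun i => PySem.List.pyGetD cs i ' ') := by
          rw [List.map_eq_flatMap]
          refine pv_flatMap_congr _ _ _ ?_
          intro x hx
          have hxm := (PySem.List.mem_pyRange_one).mp hx
          have hxp : x ≠ p := by omega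
          have hxr : x ∉ rest := fun hr => absurd (hrest_gt x hr) (by omega)
          simp [pvPiece, hxp, hxr]
        rw [h2, pv_map_pyGetD_subrange cs prev p h0 hp (by omega),
            PySem.List.slice_toNat cs h0 (by omega : (0:Int) ≤ p)]
      -- middle: the highlighted position p itself
      have hmid : ([p] : List Int).flatMap (pvPiece cs (p :: rest))
          = "<mark>".toList ++ [PySem.List.pyGetD cs p ' '] ++ "</mark>".toList := by
        simp [pvPiece]
      -- right part: induction hypothesis; membership in (p :: rest) and in rest coincide above p
      have hright : (PySem.List.pyRange (p + 1) (cs.length : Int) 1).flatMap (pvPiece cs (p :: rest))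
          = pvWalk cs rest (p + 1) := by
        rw [ih (p + 1) (List.pairwise_cons.mp hsort).2
              (fun q hq => by have := hrest_gt q hq; omega)
              (fun q hq => hhi q (by simp [hq])) (by omega) (by omega)]
        refine Eq.symm (pv_flatMap_congr _ _ _ ?_)
        intro x hx
        have hxm := (PySem.List.mem_pyRange_one).mp hx
        have hxp : x ≠ p := by omega
        simp [pvPiece, hxp]
      rw [hleft, hmid, hright]

-- A's character loop is the concatenation of the per-index pieces
lemma pv_A_eq (cs : List Char) (hits : List Int) :
    (PySem.List.pyRange 0 (cs.length : Int) 1).foldl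
      (fun acc i =>
        if i ∈ hits then
          acc ++ ("<mark>".toList ++ [PySem.List.pyGetD cs i ' '] ++ "</mark>".toList)
        else
          acc ++ [PySem.List.pyGetD cs i ' ']) []
    = (PySem.List.pyRange 0 (cs.length : Int) 1).flatMap (pvPiece cs hits) := by
  have hfun : (fun (acc : List Char) (i : Int) =>
        if i ∈ hits then
          acc ++ ("<mark>".toList ++ [PySem.List.pyGetD cs i ' '] ++ "</mark>".toList)
        else
          acc ++ [PySem.List.pyGetD cs i ' '])
      = (fun acc i => acc ++ pvPiece cs hits i) := by
    funext acc i
    by_cases h : i ∈ hits <;> simp [pvPiece, h]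
  rw [hfun, PySem.List.foldl_append_eq_flatMap]
  rfl

-- ===== VERDICT (by name: the statement is the Claim_ definition above) =====
theorem highlightHits_spec : Claim_equal_highlightHits := by
  intro search hits _
  unfold Spec_highlightHits highlightHits highlightHits_alt
  have hmem : ∀ x, x ∈ PySem.List.sorted
      (PySem.Set.ofList (hits.filter (fun p => decide (0 ≤ p) && decide (p < (search.toList.length : Int)))))
      (fun x => x) false ↔ (x ∈ hits ∧ 0 ≤ x ∧ x < (search.toList.length : Int)) := by
    intro x
    rw [PySem.List.mem_sorted, PySem.Set.mem_ofList, List.mem_filter]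
    simp
  have hsort := PySem.List.sorted_ofList_pairwise_lt
    (hits.filter (fun p => decide (0 ≤ p) && decide (p < (search.toList.length : Int))))
  rw [pv_A_eq search.toList hits,
      pv_walk_eq search.toList _ 0 hsort
        (fun p hp => ((hmem p).mp hp).2.1)
        (fun p hp => ((hmem p).mp hp).2.2)
        le_rfl (by positivity)]
  congr 1
  refine pv_flatMap_congr _ _ _ ?_
  intro x hx
  have hxm := (PySem.List.mem_pyRange_one).mp hx
  have hiff : x ∈ hits ↔ x ∈ PySem.List.sorted
      (PySem.Set.ofList (hits.filter (fun p => decide (0 ≤ p) && decide (p < (search.toList.length : Int)))))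
      (fun x => x) false := by rw [hmem x]; exact ⟨fun h => ⟨h, hxm.1, hxm.2⟩, fun h => h.1⟩
  simp only [pvPiece]
  exact if_congr hiff rfl rfl
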